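-- pv_equiv track=rewrite | github.com/makoMakoGo/agent-toolkit | skills/grok-search/scripts/groksearch_cli.py | _split_authority_and_remainder
-- ===== SOURCE A (Python) =====
-- def _split_authority_and_remainder(raw: str) -> tuple[str, str]:
--     s = (raw or "").lstrip()
--     if s.startswith("//"):
--         s = s[2:]
--
--     min_index = None
--     for sep in ("/", "?", "#"):
--         idx = s.find(sep)
--         if idx != -1 and (min_index is None or idx < min_index):
--             min_index = idx
--
--     if min_index is None:
--         return s, ""
--     return s[:min_index], s[min_index:]
-- ===== SOURCE B (Python) =====
-- def _split_authority_and_remainder(raw: str) -> tuple[str, str]: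
--     s = (raw or "").lstrip()
--     if s.startswith("//"):
--         s = s[2:]
--     for i, c in enumerate(s):
--         if c in ("/", "?", "#"):
--             return s[:i], s[i:]
--     return s, ""
-- ===== Notes on version B (the rewrite author's own statement) =====
-- stated objective: simpler
-- what changed: Replaces the three independent str.find scans plus min-tracking over separators with a single left-to-right enumerate scan that splits at the first character in ('/', '?', '#').
import Mathlib
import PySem

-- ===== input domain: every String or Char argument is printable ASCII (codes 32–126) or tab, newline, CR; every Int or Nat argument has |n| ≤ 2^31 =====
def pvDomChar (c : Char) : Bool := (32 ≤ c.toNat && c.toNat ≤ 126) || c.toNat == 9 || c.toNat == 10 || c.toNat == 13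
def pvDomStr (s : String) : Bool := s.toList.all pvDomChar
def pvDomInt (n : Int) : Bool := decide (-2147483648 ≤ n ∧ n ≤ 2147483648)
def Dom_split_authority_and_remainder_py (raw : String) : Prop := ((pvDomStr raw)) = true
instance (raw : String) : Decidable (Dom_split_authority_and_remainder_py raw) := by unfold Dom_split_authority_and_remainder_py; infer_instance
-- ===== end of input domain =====

-- B replaces A's three independent find() scans (plus min-index bookkeeping) by one
-- left-to-right scan that splits at the first '/', '?' or '#'; objective: simpler.

-- ===== PORT A =====
def split_authority_and_remainder_py (raw : String) : String × String :=
  let s0 := PySem.Str.lstrip raw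
  let s := if PySem.Str.startswith s0 "//" then PySem.Str.slice s0 (some 2) none else s0
  let minIndex : Option Int :=
    (["/", "?", "#"] : List String).foldl
      (fun mi sep =>
        let idx := PySem.Str.find s sep
        if idx ≠ -1 ∧ (mi = none ∨ idx < mi.getD 0) then some idx else mi)
      none
  match minIndex with
  | none => (s, "")
  | some m => (PySem.Str.slice s none (some m), PySem.Str.slice s (some m) none)

-- ===== PORT B =====
-- the enumerate loop of Source B: acc holds the already-scanned prefix s[:i] (reversed)
def pvScanB : List Char → List Char → String × String
  | acc, [] => (String.ofList acc.reverse, "")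
  | acc, c :: rest =>
    if c = '/' ∨ c = '?' ∨ c = '#' then
      (String.ofList acc.reverse, String.ofList (c :: rest))
    else pvScanB (c :: acc) rest

def split_authority_and_remainder_py_alt (raw : String) : String × String :=
  let s0 := PySem.Str.lstrip raw
  let s := if PySem.Str.startswith s0 "//" then PySem.Str.slice s0 (some 2) none else s0
  pvScanB [] s.toList

-- ===== PRECONDITION & SPEC =====
def Spec_split_authority_and_remainder_py (raw : String) (out : String × String) : Prop := out = split_authority_and_remainder_py_alt raw
instance (raw : String) (out : String × String) : Decidable (Spec_split_authority_and_remainder_py raw out) := by unfold Spec_split_authority_and_remainder_py; infer_instance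

-- ===== CLAIM (what is proved, stated in full; the proofs are below) =====
def Claim_equal_split_authority_and_remainder_py : Prop := ∀ (raw : String), Dom_split_authority_and_remainder_py raw → Spec_split_authority_and_remainder_py raw (split_authority_and_remainder_py raw)

-- ===== LEMMAS AND PROOFS =====

-- q c = "c is not a separator": the characters B's scan steps over
def pvQ (c : Char) : Bool := !(c == '/' || c == '?' || c == '#')

-- A's loop body, and its unfolding over the three literal separators
def pvStep (mi : Option Int) (idx : Int) : Option Int :=
  if idx ≠ -1 ∧ (mi = none ∨ idx < mi.getD 0) then some idx else mi

def pvF (r0 r1 r2 : Int) : Option Int := pvStep (pvStep (pvStep none r0) r1) r2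

lemma pvQ_true_iff (a : Char) : pvQ a = true ↔ (¬a = '/' ∧ ¬a = '?' ∧ ¬a = '#') := by
  simp [pvQ, and_assoc]

lemma pv_go_ge (c : Char) : ∀ (t : List Char) (k : Nat),
    PySem.Chars.find.go [c] t k = -1 ∨ (k : Int) ≤ PySem.Chars.find.go [c] t k := by
  intro t
  induction t with
  | nil => intro k; simp [PySem.Chars.find.go]
  | cons a t ih =>
    intro k
    by_cases h : ([c].isPrefixOf (a :: t)) = true
    · right; simp [PySem.Chars.find.go, h]
    · rcases ih (k + 1) with h1 | h1 <;>
        simp [PySem.Chars.find.go, h, h1] <;> omega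

lemma pv_go_shift (c : Char) : ∀ (t : List Char) (k : Nat),
    PySem.Chars.find.go [c] t k =
      if PySem.Chars.find.go [c] t 0 = -1 then -1 else PySem.Chars.find.go [c] t 0 + k := by
  intro t
  induction t with
  | nil => intro k; simp [PySem.Chars.find.go]
  | cons a t ih =>
    intro k
    by_cases h : ([c].isPrefixOf (a :: t)) = true
    · simp [PySem.Chars.find.go, h]
    · have h1 := ih (k + 1)
      have h0 := ih 1
      rcases pv_go_ge c t 0 with hg | hg <;>
        simp only [PySem.Chars.find.go, h, if_false, Bool.false_eq_true] at * <;>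
        · rw [h1, h0]; split_ifs <;> omega

lemma pv_find_nil (c : Char) : PySem.Chars.find [] [c] = -1 := by
  simp [PySem.Chars.find, PySem.Chars.find.go]

lemma pv_find_nonneg (c : Char) (t : List Char) :
    PySem.Chars.find t [c] = -1 ∨ 0 ≤ PySem.Chars.find t [c] := by
  have := pv_go_ge c t 0
  simpa [PySem.Chars.find] using this

lemma pv_find_cons (c a : Char) (t : List Char) :
    PySem.Chars.find (a :: t) [c] =
      if a = c then 0
      else if PySem.Chars.find t [c] = -1 then -1 else PySem.Chars.find t [c] + 1 := by
  by_cases h : a = c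
  · subst h
    simp [PySem.Chars.find, PySem.Chars.find.go, List.isPrefixOf]
  · have hp : ([c].isPrefixOf (a :: t)) = false := by
      simp [List.isPrefixOf]
      intro hc; exact h hc.symm
    have := pv_go_shift c t 1
    simp only [PySem.Chars.find, PySem.Chars.find.go, hp, Bool.false_eq_true, if_false, h]
    rw [this]
    split_ifs <;> omega

lemma pvStep_shift (mi : Option Int) (r : Int) (hr : r = -1 ∨ 0 ≤ r)
    (hmi : ∀ m, mi = some m → 0 ≤ m) :
    pvStep (mi.map (· + 1)) (if r = -1 then -1 else r + 1) = (pvStep mi r).map (· + 1) := by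
  rcases hr with hr | hr
  · subst hr
    simp [pvStep]
  · rw [if_neg (by omega)]
    have hne : (r : Int) + 1 ≠ -1 := by omega
    have hne' : r ≠ -1 := by omega
    cases mi with
    | none =>
      simp only [Option.map_none, pvStep]
      rw [if_pos ⟨hne, Or.inl (by simp)⟩, if_pos ⟨hne', Or.inl (by simp)⟩]
      rfl
    | some m =>
      have hm := hmi m rfl
      simp only [Option.map_some, pvStep]
      by_cases hlt : r < m
      · rw [if_pos ⟨hne, Or.inr (by simp; omega)⟩, if_pos ⟨hne', Or.inr (by simp; omega)⟩]
        rfl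
      · rw [if_neg (by
              rintro ⟨-, h | h⟩
              · cases h
              · simp only [Option.getD_some] at h; omega),
            if_neg (by
              rintro ⟨-, h | h⟩
              · cases h
              · simp only [Option.getD_some] at h; omega)]
        rfl

lemma pvStep_nonneg (mi : Option Int) (r : Int) (hr : r = -1 ∨ 0 ≤ r)
    (hmi : ∀ m, mi = some m → 0 ≤ m) :
    ∀ m, pvStep mi r = some m → 0 ≤ m := by
  intro m hm
  unfold pvStep at hm
  split_ifs at hm with h
  · rcases h with ⟨h1, _⟩
    cases hm
    omega
  · exact hmi m hm

lemma pv_shiftF (r0 r1 r2 : Int)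
    (h0 : r0 = -1 ∨ 0 ≤ r0) (h1 : r1 = -1 ∨ 0 ≤ r1) (h2 : r2 = -1 ∨ 0 ≤ r2) :
    pvF (if r0 = -1 then -1 else r0 + 1) (if r1 = -1 then -1 else r1 + 1)
        (if r2 = -1 then -1 else r2 + 1)
      = (pvF r0 r1 r2).map (· + 1) := by
  have n0 : ∀ m, (none : Option Int) = some m → 0 ≤ m := by intro m h; cases h
  have n1 := pvStep_nonneg none r0 h0 n0
  have n2 := pvStep_nonneg _ r1 h1 n1
  have s0 : pvStep none (if r0 = -1 then -1 else r0 + 1) = (pvStep none r0).map (· + 1) := by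
    simpa using pvStep_shift none r0 h0 n0
  unfold pvF
  rw [s0, pvStep_shift _ r1 h1 n1, pvStep_shift _ r2 h2 n2]

lemma pvF_z0 (r1 r2 : Int) (h1 : r1 = -1 ∨ 0 ≤ r1) (h2 : r2 = -1 ∨ 0 ≤ r2) :
    pvF 0 r1 r2 = some 0 := by
  rcases h1 with h1 | h1 <;> rcases h2 with h2 | h2 <;>
    (simp only [pvF, pvStep]; split_ifs <;> simp_all <;> omega)

lemma pvF_z1 (r0 r2 : Int) (h0 : r0 = -1 ∨ 0 ≤ r0) (h2 : r2 = -1 ∨ 0 ≤ r2) :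
    pvF r0 0 r2 = some 0 := by
  rcases h0 with h0 | h0 <;> rcases h2 with h2 | h2 <;>
    (simp only [pvF, pvStep]; split_ifs <;> simp_all <;> omega)

lemma pvF_z2 (r0 r1 : Int) (h0 : r0 = -1 ∨ 0 ≤ r0) (h1 : r1 = -1 ∨ 0 ≤ r1) :
    pvF r0 r1 0 = some 0 := by
  rcases h0 with h0 | h0 <;> rcases h1 with h1 | h1 <;>
    (simp only [pvF, pvStep]; split_ifs <;> simp_all <;> omega)

-- the min over A's three single-character finds is the index of the first separator
lemma pv_minFold_eq (t : List Char) :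
    pvF (PySem.Chars.find t ['/']) (PySem.Chars.find t ['?']) (PySem.Chars.find t ['#'])
      = if (t.dropWhile pvQ).isEmpty then none
        else some ((t.takeWhile pvQ).length : Int) := by
  induction t with
  | nil => simp [pv_find_nil, pvF, pvStep]
  | cons a t ih =>
    by_cases hq : pvQ a = true
    · obtain ⟨h0, h1, h2⟩ := (pvQ_true_iff a).mp hq
      rw [pv_find_cons '/' a t, if_neg h0, pv_find_cons '?' a t, if_neg h1,
          pv_find_cons '#' a t, if_neg h2,
          pv_shiftF _ _ _ (pv_find_nonneg _ t) (pv_find_nonneg _ t) (pv_find_nonneg _ t), ih]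
      simp only [List.dropWhile_cons, List.takeWhile_cons, hq, if_pos]
      split_ifs <;> simp
    · have h : a = '/' ∨ a = '?' ∨ a = '#' := by
        by_contra hc
        push Not at hc
        exact hq ((pvQ_true_iff a).mpr ⟨hc.1, hc.2.1, hc.2.2⟩)
      have hdrop : List.dropWhile pvQ (a :: t) = a :: t := by
        simp [hq]
      have htake : List.takeWhile pvQ (a :: t) = [] := by
        simp [hq]
      rw [hdrop, htake]
      rcases h with h | h | h <;> subst h
      · rw [pv_find_cons '/' _ t, if_pos rfl,
            pv_find_cons '?' _ t, if_neg (show ¬('/' : Char) = '?' by decide),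
            pv_find_cons '#' _ t, if_neg (show ¬('/' : Char) = '#' by decide)]
        simp only [List.isEmpty_cons, Bool.false_eq_true, if_false, List.length_nil, Nat.cast_zero]
        exact pvF_z0 _ _ (by rcases pv_find_nonneg '?' t with h|h <;> simp [h] <;> split_ifs <;> omega)
                        (by rcases pv_find_nonneg '#' t with h|h <;> simp [h] <;> split_ifs <;> omega)
      · rw [pv_find_cons '/' _ t, if_neg (show ¬('?' : Char) = '/' by decide), pv_find_cons '?' _ t, if_pos rfl,
            pv_find_cons '#' _ t, if_neg (show ¬('?' : Char) = '#' by decide)]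
        simp only [List.isEmpty_cons, Bool.false_eq_true, if_false, List.length_nil, Nat.cast_zero]
        exact pvF_z1 _ _ (by rcases pv_find_nonneg '/' t with h|h <;> simp [h] <;> split_ifs <;> omega)
                        (by rcases pv_find_nonneg '#' t with h|h <;> simp [h] <;> split_ifs <;> omega)
      · rw [pv_find_cons '/' _ t, if_neg (show ¬('#' : Char) = '/' by decide),
            pv_find_cons '?' _ t, if_neg (show ¬('#' : Char) = '?' by decide),
            pv_find_cons '#' _ t, if_pos rfl]
        simp only [List.isEmpty_cons, Bool.false_eq_true, if_false, List.length_nil, Nat.cast_zero]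
        exact pvF_z2 _ _ (by rcases pv_find_nonneg '/' t with h|h <;> simp [h] <;> split_ifs <;> omega)
                        (by rcases pv_find_nonneg '?' t with h|h <;> simp [h] <;> split_ifs <;> omega)

-- B's scan splits at the first separator: prefix scanned so far ++ takeWhile / dropWhile
lemma pv_scan_spec : ∀ (t acc : List Char),
    pvScanB acc t = (String.ofList (acc.reverse ++ t.takeWhile pvQ),
                     String.ofList (t.dropWhile pvQ)) := by
  intro t
  induction t with
  | nil => intro acc; simp [pvScanB]
  | cons c rest ih =>
    intro acc
    by_cases h : c = '/' ∨ c = '?' ∨ c = '#'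
    · have hq : pvQ c = false := by rcases h with h | h | h <;> simp [pvQ, h]
      simp [pvScanB, h, hq]
    · have hq : pvQ c = true := by
        push Not at h
        simp [pvQ, h.1, h.2.1, h.2.2]
      simp [pvScanB, h, hq, ih]

-- the two tails agree on any string s (both ports feed them the same preamble result)
lemma pv_core_eq (s : String) :
    (match
      (["/", "?", "#"] : List String).foldl
        (fun mi sep =>
          let idx := PySem.Str.find s sep
          if idx ≠ -1 ∧ (mi = none ∨ idx < mi.getD 0) then some idx else mi)
        (none : Option Int) with
    | none => (s, "")
    | some m => (PySem.Str.slice s none (some m), PySem.Str.slice s (some m) none))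
      = pvScanB [] s.toList := by
  have hfold :
      (["/", "?", "#"] : List String).foldl
        (fun mi sep =>
          let idx := PySem.Str.find s sep
          if idx ≠ -1 ∧ (mi = none ∨ idx < mi.getD 0) then some idx else mi)
        (none : Option Int)
      = pvF (PySem.Chars.find s.toList ['/']) (PySem.Chars.find s.toList ['?'])
            (PySem.Chars.find s.toList ['#']) := by
    simp only [List.foldl, pvF, pvStep, PySem.Str.find_eq]
    rfl
  rw [hfold, pv_minFold_eq, pv_scan_spec]
  by_cases h : (s.toList.dropWhile pvQ).isEmpty = true
  · have hd : s.toList.dropWhile pvQ = [] := by simpa using h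
    have ht : s.toList.takeWhile pvQ = s.toList := by
      have h1 := List.takeWhile_append_dropWhile (p := pvQ) (l := s.toList)
      rw [hd, List.append_nil] at h1
      exact h1
    simp [hd, ht]
  · rw [if_neg h]
    have htw : s.toList.takeWhile pvQ = List.take (s.toList.takeWhile pvQ).length s.toList :=
      List.prefix_iff_eq_take.mp (List.takeWhile_prefix pvQ)
    have hdw : List.drop (s.toList.takeWhile pvQ).length s.toList = s.toList.dropWhile pvQ := by
      have h2 := List.drop_left (l₁ := s.toList.takeWhile pvQ) (l₂ := s.toList.dropWhile pvQ)
      rw [List.takeWhile_append_dropWhile] at h2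
      exact h2
    refine Prod.ext ?_ ?_
    · apply String.toList_injective
      simp [PySem.Str.slice, PySem.Chars.slice, PySem.List.slice_to_natCast, ← htw]
    · apply String.toList_injective
      simp [PySem.Str.slice, PySem.Chars.slice, PySem.List.slice_from_natCast, hdw]

-- ===== VERDICT (by name: the statement is the Claim_ definition above) =====
theorem split_authority_and_remainder_py_spec : Claim_equal_split_authority_and_remainder_py := by
  intro raw _
  unfold Spec_split_authority_and_remainder_py
  unfold split_authority_and_remainder_py split_authority_and_remainder_py_alt
  exact pv_core_eq _
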